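-- pv_equiv track=rewrite | github.com/Rakhim1711/PytestAutomation | test_parametrize.py | now
-- ===== SOURCE A (Python) =====
-- def now(t):
--     countP = 0
--     countJ = 0
--     countT = 0
--
--     for i in t:
--         if i.endswith('txt'):
--             countT += 1
--         elif i.endswith('py'):
--             countP += 1
--         elif i.endswith('java'):
--             countJ += 1
--     return countP, countJ, countT
-- ===== SOURCE B (Python) =====
-- def now(t):
--     # Three independent filtering scans; suffixes are mutually exclusive,
--     # so this matches the single elif-priority loop exactly.
--     return (sum(1 for i in t if i.endswith('py')),
--             sum(1 for i in t if i.endswith('java')),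
--             sum(1 for i in t if i.endswith('txt')))
-- ===== Notes on version B (the rewrite author's own statement) =====
-- stated objective: alternative
-- what changed: Replaces the single loop with mutually-exclusive elif branches and three mutable counters by three independent filtering scans (one sum per extension), relying on the suffixes being mutually exclusive.
import Mathlib
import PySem

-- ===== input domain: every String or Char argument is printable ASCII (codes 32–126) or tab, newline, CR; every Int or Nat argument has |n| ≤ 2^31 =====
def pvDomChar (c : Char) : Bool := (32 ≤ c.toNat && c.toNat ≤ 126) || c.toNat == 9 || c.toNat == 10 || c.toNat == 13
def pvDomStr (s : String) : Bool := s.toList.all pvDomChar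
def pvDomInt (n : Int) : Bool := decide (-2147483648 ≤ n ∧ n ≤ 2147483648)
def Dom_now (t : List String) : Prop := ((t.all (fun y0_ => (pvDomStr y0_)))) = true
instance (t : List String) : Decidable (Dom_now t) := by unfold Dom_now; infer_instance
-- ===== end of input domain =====

-- B replaces A's single branch-per-element loop by three independent filtering scans;
-- the suffixes are mutually exclusive so the counts agree.

-- ===== PORT A =====
-- single fold carrying the three counters, branches in A's elif order
def now (t : List String) : Int × Int × Int :=
  let s := t.foldl (fun (acc : Int × Int × Int) i =>
    let (countP, countJ, countT) := acc
    if PySem.Str.endswith i "txt" then (countP, countJ, countT + 1)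
    else if PySem.Str.endswith i "py" then (countP + 1, countJ, countT)
    else if PySem.Str.endswith i "java" then (countP, countJ + 1, countT)
    else (countP, countJ, countT)) (0, 0, 0)
  s

-- ===== PORT B =====
-- three independent scans: sum(1 for i in t if i.endswith(ext))
def countEnds (t : List String) (ext : String) : Int :=
  t.foldl (fun acc i => if PySem.Str.endswith i ext then acc + 1 else acc) 0

def now_alt (t : List String) : Int × Int × Int :=
  (countEnds t "py", countEnds t "java", countEnds t "txt")

-- ===== PRECONDITION & SPEC =====
def Spec_now (t : List String) (out : Int × Int × Int) : Prop := out = now_alt t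
instance (t : List String) (out : Int × Int × Int) : Decidable (Spec_now t out) := by unfold Spec_now; infer_instance

-- ===== CLAIM (what is proved, stated in full; the proofs are below) =====
def Claim_equal_now : Prop := ∀ (t : List String), Dom_now t → Spec_now t (now t)

-- ===== LEMMAS AND PROOFS =====

theorem countEnds_acc (t : List String) (ext : String) (a : Int) :
    t.foldl (fun acc i => if PySem.Str.endswith i ext then acc + 1 else acc) a
      = a + countEnds t ext := by
  induction t generalizing a with
  | nil => simp [countEnds]
  | cons h tl ih =>
    simp only [countEnds, List.foldl_cons]
    rw [ih, ih (if PySem.Str.endswith h ext then (0:Int) + 1 else 0)]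
    split <;> ring

theorem countEnds_cons (h : String) (tl : List String) (ext : String) :
    countEnds (h :: tl) ext
      = (if PySem.Str.endswith h ext then (1:Int) else 0) + countEnds tl ext := by
  conv_lhs => rw [countEnds, List.foldl_cons, countEnds_acc]
  split <;> ring

-- no filename can end with two of the three suffixes (their last chars differ)
theorem excl_txt_py (i : String) (h : PySem.Str.endswith i "txt" = true) :
    PySem.Str.endswith i "py" = false := by
  by_contra hb
  rw [Bool.not_eq_false, PySem.Str.endswith_eq, PySem.Chars.endswith_iff] at hb
  rw [PySem.Str.endswith_eq, PySem.Chars.endswith_iff] at h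
  obtain ⟨u, hu⟩ := h
  obtain ⟨v, hv⟩ := hb
  have := congrArg List.getLast? (hu.trans hv.symm)
  simp [List.getLast?_append] at this

theorem excl_txt_java (i : String) (h : PySem.Str.endswith i "txt" = true) :
    PySem.Str.endswith i "java" = false := by
  by_contra hb
  rw [Bool.not_eq_false, PySem.Str.endswith_eq, PySem.Chars.endswith_iff] at hb
  rw [PySem.Str.endswith_eq, PySem.Chars.endswith_iff] at h
  obtain ⟨u, hu⟩ := h
  obtain ⟨v, hv⟩ := hb
  have := congrArg List.getLast? (hu.trans hv.symm)
  simp [List.getLast?_append] at this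

theorem excl_py_java (i : String) (h : PySem.Str.endswith i "py" = true) :
    PySem.Str.endswith i "java" = false := by
  by_contra hb
  rw [Bool.not_eq_false, PySem.Str.endswith_eq, PySem.Chars.endswith_iff] at hb
  rw [PySem.Str.endswith_eq, PySem.Chars.endswith_iff] at h
  obtain ⟨u, hu⟩ := h
  obtain ⟨v, hv⟩ := hb
  have := congrArg List.getLast? (hu.trans hv.symm)
  simp [List.getLast?_append] at this

theorem now_inv (t : List String) (p j c : Int) :
    t.foldl (fun (acc : Int × Int × Int) i =>
      let (countP, countJ, countT) := acc
      if PySem.Str.endswith i "txt" then (countP, countJ, countT + 1)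
      else if PySem.Str.endswith i "py" then (countP + 1, countJ, countT)
      else if PySem.Str.endswith i "java" then (countP, countJ + 1, countT)
      else (countP, countJ, countT)) (p, j, c)
      = (p + countEnds t "py", j + countEnds t "java", c + countEnds t "txt") := by
  induction t generalizing p j c with
  | nil => simp [countEnds]
  | cons h tl ih =>
    simp only [List.foldl_cons]
    by_cases h1 : PySem.Str.endswith h "txt" = true
    · have hp : PySem.Str.endswith h "py" = false := excl_txt_py h h1
      have hj : PySem.Str.endswith h "java" = false := excl_txt_java h h1
      simp only [h1, hp, hj, if_true, ih, countEnds_cons,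
        Bool.false_eq_true, if_false, Prod.mk.injEq]
      refine ⟨by ring, by ring, by ring⟩
    · by_cases h2 : PySem.Str.endswith h "py" = true
      · have hj : PySem.Str.endswith h "java" = false := excl_py_java h h2
        simp only [h1, h2, hj, ih, countEnds_cons,
          Bool.false_eq_true, if_false, if_true, Prod.mk.injEq]
        refine ⟨by ring, by ring, by ring⟩
      · by_cases h3 : PySem.Str.endswith h "java" = true
        · simp only [h1, h2, h3, ih, countEnds_cons, Bool.false_eq_true, if_false, if_true, Prod.mk.injEq]
          refine ⟨by ring, by ring, by ring⟩
        · simp only [h1, h2, h3, ih, countEnds_cons, Bool.false_eq_true, if_false, Prod.mk.injEq]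
          refine ⟨by ring, by ring, by ring⟩

theorem now_eq_alt (t : List String) : now t = now_alt t := by
  simp only [now, now_alt, now_inv, Prod.mk.injEq]
  refine ⟨by ring, by ring, by ring⟩

-- ===== VERDICT (by name: the statement is the Claim_ definition above) =====
theorem now_spec : Claim_equal_now := by
  intro t _
  unfold Spec_now
  exact now_eq_alt t
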